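-- pv_equiv track=rewrite | github.com/ChipsAchoy/Circuit-Designer | tools.py | searchNameRes
-- ===== SOURCE A (Python) =====
-- def searchNameRes(dictionary,
--                   list):  # Busca el nombre de las resistencias tomando un diccionario con estas y una lista ordenada de las resistencias
--     result = {}
--     for i in list:
--         for j in dictionary:
--             if i == dictionary.get(j):
--                 temp = {j: i}
--                 result.update(temp)
--     return result
-- ===== SOURCE B (Python) =====
-- def searchNameRes(dictionary, list):
--     # Invert the dictionary once into a value -> [keys] index, then make one
--     # pass over the list, emitting each value's keys the first time it is seen.
--     index = {}
--     for k, v in dictionary.items():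
--         index.setdefault(v, []).append(k)
--     result = {}
--     seen = set()
--     for i in list:
--         if i not in seen:
--             seen.add(i)
--             for k in index.get(i, ()):
--                 result[k] = i
--     return result
-- ===== Notes on version B (the rewrite author's own statement) =====
-- stated objective: faster
-- what changed: B builds a value-to-keys inverted index of the dictionary once and then makes a single pass over the list with a seen-set, instead of A's rescan of the whole dictionary for every list element.
import Mathlib
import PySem

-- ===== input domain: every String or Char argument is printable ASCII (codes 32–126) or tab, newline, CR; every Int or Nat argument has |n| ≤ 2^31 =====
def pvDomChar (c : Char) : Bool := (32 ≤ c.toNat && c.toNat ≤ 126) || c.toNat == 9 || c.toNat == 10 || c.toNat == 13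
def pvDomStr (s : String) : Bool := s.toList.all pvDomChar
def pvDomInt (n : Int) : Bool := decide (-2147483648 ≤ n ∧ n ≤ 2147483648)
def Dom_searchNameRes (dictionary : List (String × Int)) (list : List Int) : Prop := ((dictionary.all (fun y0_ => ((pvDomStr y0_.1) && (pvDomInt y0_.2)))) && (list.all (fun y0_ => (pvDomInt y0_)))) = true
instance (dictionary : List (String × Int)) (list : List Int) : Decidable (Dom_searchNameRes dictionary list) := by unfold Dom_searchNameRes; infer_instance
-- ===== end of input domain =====

-- B inverts the dictionary once into a value→keys index and makes one pass over the list,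
-- instead of A's rescan of the whole dictionary for every list element (asymptotically faster).

-- ===== PORT A =====
def searchNameRes (dictionary : List (String × Int)) (list : List Int) : List (String × Int) :=
  let d := PySem.Dict.ofList dictionary
  (list.foldl
    (fun result i =>
      d.keys.foldl
        (fun result j => if d.get? j == some i then result.insert j i else result)
        result)
    PySem.Dict.empty).items

-- ===== PORT B =====
def searchNameRes_alt (dictionary : List (String × Int)) (list : List Int) : List (String × Int) :=
  let d := PySem.Dict.ofList dictionary
  let index : PySem.Dict Int (List String) :=
    d.items.foldl (fun ix p => ix.modify p.2 [] (fun ks => ks ++ [p.1])) PySem.Dict.empty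
  (list.foldl
    (fun (st : PySem.Set Int × PySem.Dict String Int) i =>
      if st.1.contains i then st
      else (st.1.add i,
            (index.getD i []).foldl (fun r k => r.insert k i) st.2))
    (PySem.Set.empty, PySem.Dict.empty)).2.items

-- ===== PRECONDITION & SPEC =====
def Spec_searchNameRes (dictionary : List (String × Int)) (list : List Int) (out : List (String × Int)) : Prop := out = searchNameRes_alt dictionary list
instance (dictionary : List (String × Int)) (list : List Int) (out : List (String × Int)) : Decidable (Spec_searchNameRes dictionary list out) := by unfold Spec_searchNameRes; infer_instance

-- ===== CLAIM (what is proved, stated in full; the proofs are below) =====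
def Claim_equal_searchNameRes : Prop := ∀ (dictionary : List (String × Int)) (list : List Int), Dom_searchNameRes dictionary list → Spec_searchNameRes dictionary list (searchNameRes dictionary list)

-- ===== LEMMAS AND PROOFS =====

-- the dictionary entries whose value is i, in dictionary order
def pvSeg (D : List (String × Int)) (i : Int) : List (String × Int) :=
  D.filter (fun q => q.2 == i)

-- the common result shape: for each distinct value of p in first-occurrence order, its entries
def pvSegs (D : List (String × Int)) (p : List Int) : List (String × Int) :=
  (PySem.Set.ofList p).flatMap (fun i => pvSeg D i)

lemma pv_key_unique {D : List (String × Int)} (h : (D.map Prod.fst).Nodup)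
    {k : String} {v w : Int} (hv : (k, v) ∈ D) (hw : (k, w) ∈ D) : v = w := by
  induction D with
  | nil => simp at hv
  | cons q t ih =>
    simp only [List.map_cons, List.nodup_cons] at h
    rcases List.mem_cons.1 hv with h1 | hv' <;> rcases List.mem_cons.1 hw with h2 | hw'
    · exact congrArg Prod.snd (h1.trans h2.symm)
    · exact absurd (List.mem_map.2 ⟨(k, w), hw', (congrArg Prod.fst h1 : k = q.1)⟩) h.1
    · exact absurd (List.mem_map.2 ⟨(k, v), hv', (congrArg Prod.fst h2 : k = q.1)⟩) h.1
    · exact ih h.2 hv' hw'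

lemma pv_mem_seg {D : List (String × Int)} {i : Int} {q : String × Int}
    (h : q ∈ pvSeg D i) : q ∈ D ∧ q.2 = i := by
  simpa [pvSeg, List.mem_filter] using h

lemma pv_mem_segs {D : List (String × Int)} {p : List Int} {q : String × Int}
    (h : q ∈ pvSegs D p) : q ∈ D ∧ q.2 ∈ p := by
  rcases List.mem_flatMap.1 h with ⟨i, hi, hq⟩
  rcases pv_mem_seg hq with ⟨h1, h2⟩
  exact ⟨h1, h2 ▸ (PySem.Set.mem_ofList p i).1 hi⟩

lemma pv_seg_subset_segs {D : List (String × Int)} {p : List Int} {i : Int}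
    (hi : i ∈ p) {q : String × Int} (hq : q ∈ pvSeg D i) : q ∈ pvSegs D p :=
  List.mem_flatMap.2 ⟨i, (PySem.Set.mem_ofList p i).2 hi, hq⟩

lemma pv_ofList_append_singleton (p : List Int) (i : Int) :
    PySem.Set.ofList (p ++ [i]) = (PySem.Set.ofList p).add i := by
  simp [PySem.Set.ofList, List.foldl_append]

lemma pv_add_of_mem {p : List Int} {i : Int} (hi : i ∈ p) :
    (PySem.Set.ofList p).add i = PySem.Set.ofList p := by
  simp [PySem.Set.add, hi]

lemma pv_add_of_not_mem {p : List Int} {i : Int} (hi : i ∉ p) :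
    (PySem.Set.ofList p).add i = PySem.Set.ofList p ++ [i] := by
  simp [PySem.Set.add, hi]

lemma pv_segs_append (D : List (String × Int)) (p : List Int) (i : Int) :
    pvSegs D (p ++ [i]) =
      if i ∈ p then pvSegs D p else pvSegs D p ++ pvSeg D i := by
  unfold pvSegs
  rw [pv_ofList_append_singleton]
  by_cases hi : i ∈ p
  · rw [pv_add_of_mem hi]; simp [hi]
  · rw [pv_add_of_not_mem hi]; simp [hi]

lemma pv_nodup_seg_keys {D : List (String × Int)} (hD : (D.map Prod.fst).Nodup)
    (i : Int) : ((pvSeg D i).map Prod.fst).Nodup :=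
  ((List.filter_sublist (l := D)).map Prod.fst).nodup hD

lemma pv_nodup_keys_flat {D : List (String × Int)} (hD : (D.map Prod.fst).Nodup)
    {vs : List Int} (hvs : vs.Nodup) :
    ((vs.flatMap (fun i => pvSeg D i)).map Prod.fst).Nodup := by
  induction vs with
  | nil => simp
  | cons i t ih =>
    simp only [List.nodup_cons] at hvs
    rw [List.flatMap_cons]
    simp only [List.map_append, List.nodup_append]
    refine ⟨pv_nodup_seg_keys hD i, ih hvs.2, ?_⟩
    intro a ha b hb hab
    subst hab
    rcases List.mem_map.1 ha with ⟨q, hq, rfl⟩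
    rcases List.mem_map.1 hb with ⟨q', hq', hfst⟩
    rcases pv_mem_seg hq with ⟨hqD, hq2⟩
    rcases List.mem_flatMap.1 hq' with ⟨i', hi', hq'seg⟩
    rcases pv_mem_seg hq'seg with ⟨hq'D, hq'2⟩
    have hq'D' : (q.1, q'.2) ∈ D := by rw [← hfst]; simpa using hq'D
    have : q.2 = q'.2 := pv_key_unique hD (by simpa using hqD) hq'D'
    exact hvs.1 (by rw [← hq2, this, hq'2]; exact hi')

lemma pv_nodup_keys_segs {D : List (String × Int)} (hD : (D.map Prod.fst).Nodup)
    (p : List Int) : ((pvSegs D p).map Prod.fst).Nodup :=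
  pv_nodup_keys_flat hD (PySem.Set.nodup_ofList p)

lemma pv_seg_pairs (D : List (String × Int)) (i : Int) :
    ((pvSeg D i).map Prod.fst).map (fun k => (k, i)) = pvSeg D i := by
  rw [List.map_map]
  conv_rhs => rw [← List.map_id (pvSeg D i)]
  apply List.map_congr_left
  intro q hq
  rcases pv_mem_seg hq with ⟨-, h2⟩
  simp [← h2]

lemma pv_insert_self_of_mem {r : PySem.Dict String Int} {k : String} {v : Int}
    (hnd : r.keys.Nodup) (h : (k, v) ∈ r.items) : r.insert k v = r := by
  have hc : r.contains k = true :=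
    (PySem.Dict.contains_iff_mem_keys r k).2 (List.mem_map.2 ⟨(k, v), h, rfl⟩)
  apply PySem.Dict.ext
  rw [PySem.Dict.items_insert_of_contains r v hc]
  conv_rhs => rw [← List.map_id r.items]
  apply List.map_congr_left
  intro q hq
  by_cases hqk : (q.1 == k) = true
  · have hk : q.1 = k := by simpa using hqk
    have hrnd : (r.items.map Prod.fst).Nodup := by simpa [PySem.Dict.keys] using hnd
    have hv : q.2 = v := pv_key_unique hrnd (by simpa using hq) (hk ▸ h)
    rw [if_pos hqk, ← hk, ← hv]
    rfl
  · simp [hqk]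

-- keys of r never change through the redundant re-inserts of A's inner loop
lemma pv_foldl_insert_mem {r : PySem.Dict String Int} {i : Int} {m : List String}
    (hnd : r.keys.Nodup) (hall : ∀ j ∈ m, (j, i) ∈ r.items) :
    m.foldl (fun r j => r.insert j i) r = r := by
  induction m with
  | nil => rfl
  | cons j t ih =>
    have h1 : r.insert j i = r := pv_insert_self_of_mem hnd (hall j (List.mem_cons_self))
    simp only [List.foldl_cons, h1]
    exact ih (fun j hj => hall j (List.mem_cons_of_mem _ hj))

-- a key whose dictionary value i has not been seen yet is absent from the accumulated result
lemma pv_fresh {d : PySem.Dict String Int} (hD : d.keys.Nodup) {r : PySem.Dict String Int}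
    {p : List Int} (hr : r.items = pvSegs d.items p) {i : Int} (hip : i ∉ p)
    {j : String} (hj : (j, i) ∈ d.items) : r.contains j = false := by
  rcases Bool.eq_false_or_eq_true (r.contains j) with h | h
  swap
  · exact h
  · exfalso
    have hjk := (PySem.Dict.contains_iff_mem_keys r j).1 h
    have hjm : j ∈ r.items.map Prod.fst := by simpa [PySem.Dict.keys] using hjk
    rcases List.mem_map.1 hjm with ⟨q, hq, rfl⟩
    rw [hr] at hq
    rcases pv_mem_segs hq with ⟨hqD, hq2⟩
    have hDm : (d.items.map Prod.fst).Nodup := by simpa [PySem.Dict.keys] using hD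
    have : i = q.2 := pv_key_unique hDm hj (by simpa using hqD)
    exact hip (this ▸ hq2)

lemma pv_A_inner_keys_aux (l : List (String × Int)) (h : (l.map Prod.fst).Nodup) (i : Int) :
    ((l.map Prod.fst).filter (fun j => (PySem.Dict.mk l).get? j == some i)).map (fun j => (j, i))
      = pvSeg l i := by
  induction l with
  | nil => simp [pvSeg]
  | cons q t ih =>
    obtain ⟨k, v⟩ := q
    simp only [List.map_cons, List.nodup_cons] at h
    have hck : ((PySem.Dict.mk ((k, v) :: t)).get? k == some i) = (v == i) := by
      simp [PySem.Dict.get?_mk_cons]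
    have htail : ∀ j ∈ t.map Prod.fst,
        ((PySem.Dict.mk ((k, v) :: t)).get? j == some i)
          = ((PySem.Dict.mk t).get? j == some i) := by
      intro j hj
      have hne : (k == j) = false := by
        rcases List.mem_map.1 hj with ⟨q', hq', rfl⟩
        exact beq_eq_false_iff_ne.2 (fun e => h.1 (e ▸ List.mem_map.2 ⟨q', hq', rfl⟩))
      rw [PySem.Dict.get?_mk_cons]
      simp [hne]
    rw [List.map_cons, List.filter_cons, List.filter_congr htail, hck]
    by_cases hvi : v = i
    · rw [if_pos (by simp [hvi]), List.map_cons, ih h.2]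
      simp [pvSeg, hvi]
    · rw [if_neg (by simp [hvi]), ih h.2]
      simp [pvSeg, hvi]

lemma pv_A_inner_keys (d : PySem.Dict String Int) (hnd : d.keys.Nodup) (i : Int) :
    (d.keys.filter (fun j => d.get? j == some i)).map (fun j => (j, i)) = pvSeg d.items i := by
  obtain ⟨l⟩ := d
  exact pv_A_inner_keys_aux l (by simpa [PySem.Dict.keys] using hnd) i

lemma pv_A_step (d : PySem.Dict String Int) (hD : d.keys.Nodup)
    (r : PySem.Dict String Int) (p : List Int) (i : Int)
    (hr : r.items = pvSegs d.items p) :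
    (d.keys.foldl (fun result j => if d.get? j == some i then result.insert j i else result) r).items
      = pvSegs d.items (p ++ [i]) := by
  have hDm : (d.items.map Prod.fst).Nodup := by simpa [PySem.Dict.keys] using hD
  have hrnd : r.keys.Nodup := by
    have := pv_nodup_keys_segs hDm p
    rw [← hr] at this
    simpa [PySem.Dict.keys] using this
  have hfold :
      d.keys.foldl (fun result j => if d.get? j == some i then result.insert j i else result) r
        = (d.keys.filter (fun j => d.get? j == some i)).foldl (fun r j => r.insert j i) r := by
    rw [List.foldl_filter]
  rw [hfold, pv_segs_append]
  have hkeys := pv_A_inner_keys d hD i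
  by_cases hip : i ∈ p
  · rw [if_pos hip]
    rw [pv_foldl_insert_mem hrnd ?hall, hr]
    case hall =>
      intro j hj
      have : (j, i) ∈ pvSeg d.items i := by
        rw [← hkeys]; exact List.mem_map.2 ⟨j, hj, rfl⟩
      rw [hr]; exact pv_seg_subset_segs hip this
  · rw [if_neg hip]
    have hfresh : ∀ j ∈ d.keys.filter (fun j => d.get? j == some i), r.contains (id j) = false := by
      intro j hj
      have hji : (j, i) ∈ pvSeg d.items i := by
        rw [← hkeys]; exact List.mem_map.2 ⟨j, hj, rfl⟩
      exact pv_fresh hD hr hip (pv_mem_seg hji).1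
    have hnodupm : ((d.keys.filter (fun j => d.get? j == some i)).map id).Nodup := by
      simpa using (List.filter_sublist (l := d.keys)).nodup hD
    have := PySem.Dict.items_foldl_insert_fresh
      (d.keys.filter (fun j => d.get? j == some i)) id (fun _ => i) r hfresh hnodupm
    rw [show ((d.keys.filter (fun j => d.get? j == some i)).foldl (fun r j => r.insert j i) r)
          = ((d.keys.filter (fun j => d.get? j == some i)).foldl
              (fun r j => r.insert (id j) ((fun _ => i) j)) r) from rfl,
        this, hr]
    congr 1

lemma pv_A_trav (d : PySem.Dict String Int) (hD : d.keys.Nodup) :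
    ∀ (l : List Int) (p : List Int) (r : PySem.Dict String Int),
      r.items = pvSegs d.items p →
      (l.foldl (fun result i =>
          d.keys.foldl (fun result j => if d.get? j == some i then result.insert j i else result)
            result) r).items = pvSegs d.items (p ++ l) := by
  intro l
  induction l with
  | nil => intro p r hr; simpa using hr
  | cons i t ih =>
    intro p r hr
    have h1 := pv_A_step d hD r p i hr
    have h2 := ih (p ++ [i]) _ h1
    simpa using h2

lemma pv_index_getD (d : PySem.Dict String Int) (i : Int) :
    (d.items.foldl (fun ix p => ix.modify p.2 [] (fun ks => ks ++ [p.1])) PySem.Dict.empty).getD i []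
      = (pvSeg d.items i).map Prod.fst := by
  have hmap :
      d.items.foldl (fun ix p => ix.modify p.2 [] (fun ks => ks ++ [p.1])) PySem.Dict.empty
        = (d.items.map (fun p => (p.2, p.1))).foldl
            (fun ix p => ix.modify p.1 [] (fun ks => ks ++ [p.2])) PySem.Dict.empty := by
    rw [List.foldl_map]
  rw [hmap, PySem.Dict.getD_foldl_modify_append]
  simp [List.filter_map, List.map_map, pvSeg, Function.comp_def]

lemma pv_B_trav (d : PySem.Dict String Int) (hD : d.keys.Nodup) :
    ∀ (l : List Int) (p : List Int) (st : PySem.Set Int × PySem.Dict String Int),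
      st.1 = PySem.Set.ofList p → st.2.items = pvSegs d.items p →
      ((l.foldl (fun (st : PySem.Set Int × PySem.Dict String Int) i =>
          if st.1.contains i then st
          else (st.1.add i,
            ((d.items.foldl (fun ix p => ix.modify p.2 [] (fun ks => ks ++ [p.1]))
                PySem.Dict.empty).getD i []).foldl (fun r k => r.insert k i) st.2)) st).2).items
        = pvSegs d.items (p ++ l) := by
  intro l
  induction l with
  | nil => intro p st h1 h2; simpa using h2
  | cons i t ih =>
    intro p st h1 h2
    rw [List.foldl_cons]
    by_cases hip : i ∈ p
    · have hc : st.1.contains i = true := by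
        rw [h1]; simpa [List.contains_iff_mem, PySem.Set.mem_ofList] using hip
      rw [if_pos hc]
      have h2' : st.2.items = pvSegs d.items (p ++ [i]) := by
        rw [pv_segs_append, if_pos hip]; exact h2
      have h1' : st.1 = PySem.Set.ofList (p ++ [i]) := by
        rw [pv_ofList_append_singleton, pv_add_of_mem hip]; exact h1
      simpa using ih (p ++ [i]) st h1' h2'
    · have hc : st.1.contains i = false := by
        rw [h1]
        simp only [Bool.eq_false_iff]
        intro hcon
        exact hip ((PySem.Set.mem_ofList p i).1
          (by simpa [List.contains_iff_mem] using hcon))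
      rw [if_neg (ne_true_of_eq_false hc)]
      have hks := pv_index_getD d i
      have hfresh : ∀ j ∈ (pvSeg d.items i).map Prod.fst, st.2.contains (id j) = false := by
        intro j hj
        rcases List.mem_map.1 hj with ⟨q, hq, rfl⟩
        rcases pv_mem_seg hq with ⟨hqD, hq2⟩
        exact pv_fresh hD h2 hip (by rw [← hq2]; simpa using hqD)
      have hDm : (d.items.map Prod.fst).Nodup := by simpa [PySem.Dict.keys] using hD
      have hnodup : (((pvSeg d.items i).map Prod.fst).map id).Nodup := by
        simpa using pv_nodup_seg_keys hDm i
      have hins := PySem.Dict.items_foldl_insert_fresh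
        ((pvSeg d.items i).map Prod.fst) id (fun _ => i) st.2 hfresh hnodup
      have h2' :
          (((pvSeg d.items i).map Prod.fst).foldl (fun r k => r.insert k i) st.2).items
            = pvSegs d.items (p ++ [i]) := by
        rw [show (((pvSeg d.items i).map Prod.fst).foldl (fun r k => r.insert k i) st.2)
              = (((pvSeg d.items i).map Prod.fst).foldl
                  (fun r k => r.insert (id k) ((fun _ => i) k)) st.2) from rfl,
            hins, h2, pv_segs_append, if_neg hip]
        congr 1
        exact pv_seg_pairs d.items i
      have h1' : (st.1.add i) = PySem.Set.ofList (p ++ [i]) := by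
        rw [pv_ofList_append_singleton, h1]
      have := ih (p ++ [i])
        (st.1.add i, ((pvSeg d.items i).map Prod.fst).foldl (fun r k => r.insert k i) st.2)
        h1' h2'
      rw [hks]
      simpa using this

-- ===== VERDICT (by name: the statement is the Claim_ definition above) =====
theorem searchNameRes_spec : Claim_equal_searchNameRes := by
  intro dictionary list _
  unfold Spec_searchNameRes searchNameRes searchNameRes_alt
  have hD := PySem.Dict.nodup_keys_ofList (κ := String) (ν := Int) dictionary
  rw [pv_A_trav (PySem.Dict.ofList dictionary) hD list [] PySem.Dict.empty rfl,
      pv_B_trav (PySem.Dict.ofList dictionary) hD list []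
        (PySem.Set.empty, PySem.Dict.empty) rfl rfl]
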